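-- pv_equiv track=rewrite | github.com/grasshopperTrainer/coding_practice | baekjoon/accepted/2805 나무 자르기.py | solution
-- ===== SOURCE A (Python) =====
-- def solution(N, M, trees):
--
--     def tree_cut(l):
--         count = 0
--         for t in trees:
--             count += max([0, t-l])
--         return count
--
--     s, e = 0, 1_000_000_000
--     while s <= e:
--         m = (s+e)//2
--         if tree_cut(m) >= M:    # set max height
--             s = m + 1
--         else:
--             e = m - 1
--     return e
-- ===== SOURCE B (Python) =====
-- def solution(N, M, trees):
--     srt = sorted(trees)
--     n = len(srt)
--     prefix = [0]
--     for t in srt: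
--         prefix.append(prefix[-1] + t)
--     total = prefix[n]
--
--     def harvested(l):
--         lo, hi = 0, n
--         while lo < hi:
--             mid = (lo + hi) // 2
--             if srt[mid] <= l:
--                 lo = mid + 1
--             else:
--                 hi = mid
--         return (total - prefix[lo]) - l * (n - lo)
--
--     s, e = 0, 1_000_000_000
--     while s <= e:
--         m = (s + e) // 2
--         if harvested(m) >= M:
--             s = m + 1
--         else:
--             e = m - 1
--     return e
-- ===== Notes on version B (the rewrite author's own statement) =====
-- stated objective: faster
-- what changed: B sorts the trees once and builds a prefix-sum table, then answers each probe of the unchanged binary search over the cut height with a hand-written bisect plus an O(1) table lookup instead of A's linear rescan of all trees.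
import Mathlib
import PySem

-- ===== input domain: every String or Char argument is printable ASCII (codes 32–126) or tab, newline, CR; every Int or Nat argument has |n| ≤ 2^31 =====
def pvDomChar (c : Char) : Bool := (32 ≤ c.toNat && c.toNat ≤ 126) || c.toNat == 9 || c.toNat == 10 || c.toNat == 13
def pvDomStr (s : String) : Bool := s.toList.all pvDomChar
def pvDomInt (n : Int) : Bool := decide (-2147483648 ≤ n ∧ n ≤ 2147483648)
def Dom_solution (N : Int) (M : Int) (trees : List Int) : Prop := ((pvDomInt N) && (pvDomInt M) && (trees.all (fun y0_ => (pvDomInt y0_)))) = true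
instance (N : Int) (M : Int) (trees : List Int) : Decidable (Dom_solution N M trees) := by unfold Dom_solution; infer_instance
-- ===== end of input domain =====

-- B sorts the trees once, builds a prefix-sum table, and answers each binary-search probe
-- with a hand-written bisect + table lookup instead of rescanning all trees (objective: faster).


-- ===== PORT A =====
-- count = 0; for t in trees: count += max([0, t-l])
def treeCut (trees : List Int) (l : Int) : Int :=
  trees.foldl (fun count t => count + max 0 (t - l)) 0

-- while s <= e: m = (s+e)//2; if tree_cut(m) >= M: s = m+1 else e = m-1; return e
def solutionLoop (M : Int) (trees : List Int) (s e : Int) : Int :=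
  if h : s ≤ e then
    if treeCut trees (PySem.Int.floordiv (s + e) 2) ≥ M then
      solutionLoop M trees (PySem.Int.floordiv (s + e) 2 + 1) e
    else solutionLoop M trees s (PySem.Int.floordiv (s + e) 2 - 1)
  else e
termination_by (e + 1 - s).toNat
decreasing_by
  · have hb := PySem.Int.floordiv_two_mid_bounds h; omega
  · have hb := PySem.Int.floordiv_two_mid_bounds h; omega

def solution (N : Int) (M : Int) (trees : List Int) : Int :=
  solutionLoop M trees 0 1000000000

-- ===== PORT B =====
-- prefix = [0]; for t in srt: prefix.append(prefix[-1] + t)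
def prefixSums (srt : List Int) : List Int :=
  srt.foldl (fun pfx t => pfx ++ [PySem.List.pyGetD pfx (-1) 0 + t]) [0]

-- lo, hi = 0, n; while lo < hi: mid = (lo+hi)//2; if srt[mid] <= l: lo = mid+1 else hi = mid
def bisectLoop (srt : List Int) (l lo hi : Int) : Int :=
  if h : lo < hi then
    if PySem.List.pyGetD srt (PySem.Int.floordiv (lo + hi) 2) 0 ≤ l then
      bisectLoop srt l (PySem.Int.floordiv (lo + hi) 2 + 1) hi
    else bisectLoop srt l lo (PySem.Int.floordiv (lo + hi) 2)
  else lo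
termination_by (hi - lo).toNat
decreasing_by
  · have hb := PySem.Int.floordiv_two_mid_bounds (le_of_lt h); omega
  · have hb := PySem.Int.floordiv_two_mid_bounds (le_of_lt h)
    have hb2 : PySem.Int.floordiv (lo + hi) 2 < hi :=
      (PySem.Int.floordiv_lt_iff_lt_mul (by omega)).mpr (by omega)
    omega

-- return (total - prefix[lo]) - l * (n - lo)
def harvested (srt pfx : List Int) (n total l : Int) : Int :=
  let lo := bisectLoop srt l 0 n
  (total - PySem.List.pyGetD pfx lo 0) - l * (n - lo)

def solutionAltLoop (M : Int) (srt pfx : List Int) (n total s e : Int) : Int :=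
  if h : s ≤ e then
    if harvested srt pfx n total (PySem.Int.floordiv (s + e) 2) ≥ M then
      solutionAltLoop M srt pfx n total (PySem.Int.floordiv (s + e) 2 + 1) e
    else solutionAltLoop M srt pfx n total s (PySem.Int.floordiv (s + e) 2 - 1)
  else e
termination_by (e + 1 - s).toNat
decreasing_by
  · have hb := PySem.Int.floordiv_two_mid_bounds h; omega
  · have hb := PySem.Int.floordiv_two_mid_bounds h; omega

def solution_alt (N : Int) (M : Int) (trees : List Int) : Int :=
  let srt := PySem.List.sorted trees (fun x => x)
  let n : Int := srt.length
  let pfx := prefixSums srt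
  let total := PySem.List.pyGetD pfx n 0
  solutionAltLoop M srt pfx n total 0 1000000000

-- ===== PRECONDITION & SPEC =====
def Spec_solution (N : Int) (M : Int) (trees : List Int) (out : Int) : Prop := out = solution_alt N M trees
instance (N : Int) (M : Int) (trees : List Int) (out : Int) : Decidable (Spec_solution N M trees out) := by unfold Spec_solution; infer_instance

-- ===== CLAIM (what is proved, stated in full; the proofs are below) =====
def Claim_equal_solution : Prop := ∀ (N : Int) (M : Int) (trees : List Int), Dom_solution N M trees → Spec_solution N M trees (solution N M trees)

-- ===== LEMMAS AND PROOFS =====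

-- prefixSums xs lists the partial sums of xs: entry k is the sum of the first k elements.
theorem prefixSums_eq (xs : List Int) :
    prefixSums xs = (List.range (xs.length + 1)).map (fun k => ((xs.take k).sum : Int)) := by
  induction xs using List.reverseRecOn with
  | nil => decide
  | append_singleton xs y ih =>
    unfold prefixSums at *
    rw [List.foldl_append, ih]
    simp only [List.foldl_cons, List.foldl_nil]
    rw [List.length_append, List.length_singleton]
    rw [List.range_succ, List.map_append]
    rw [List.range_succ (n := xs.length + 1), List.map_append]
    congr 1
    · -- prefixes over range (n+1): take of xs++[y] = take of xs
      rw [List.range_succ, List.map_append]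
      congr 1
      · apply List.map_congr_left
        intro k hk
        rw [List.mem_range] at hk
        rw [List.take_append_of_le_length (by omega)]
      · simp
    · -- the appended element
      simp only [List.map_cons, List.map_nil]
      rw [PySem.List.pyGetD_neg_one_append_singleton]
      simp [List.take_of_length_le]

theorem countP_ge_of_sorted (xs : List Int) (l : Int) (i : Nat)
    (hp : xs.Pairwise (· ≤ ·)) (hi : i < xs.length) (hx : xs[i] ≤ l) :
    i + 1 ≤ xs.countP (fun t => t ≤ l) := by
  induction xs generalizing i with
  | nil => simp at hi
  | cons x xs ih =>
    rw [List.countP_cons]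
    rcases List.pairwise_cons.mp hp with ⟨hx1, hp'⟩
    cases i with
    | zero =>
      simp at hx
      simp [hx]
    | succ i =>
      simp at hi
      have hxi : xs[i] ≤ l := by simpa using hx
      have h1 := ih i hp' (by omega) hxi
      have h2 : x ≤ l := le_trans (hx1 _ (List.getElem_mem _)) hxi
      simp [h2]; omega

theorem countP_le_of_sorted (xs : List Int) (l : Int) (i : Nat)
    (hp : xs.Pairwise (· ≤ ·)) (hi : i < xs.length) (hx : l < xs[i]) :
    xs.countP (fun t => t ≤ l) ≤ i := by
  induction xs generalizing i with
  | nil => simp at hi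
  | cons x xs ih =>
    rw [List.countP_cons]
    rcases List.pairwise_cons.mp hp with ⟨hx1, hp'⟩
    cases i with
    | zero =>
      simp at hx
      have : xs.countP (fun t => t ≤ l) = 0 := by
        rw [List.countP_eq_zero]
        intro t ht
        simp only [decide_eq_true_eq]
        intro hle
        exact absurd hle (not_le.mpr (lt_of_lt_of_le hx (hx1 t ht)))
      simp [this, not_le.mpr hx]
    | succ i =>
      simp at hi
      have hxi : l < xs[i] := by simpa using hx
      have h1 := ih i hp' (by omega) hxi
      split <;> omega

-- the bisect loop computes countP (· ≤ l) on a sorted list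
theorem bisectLoop_eq_aux (xs : List Int) (l : Int) (hp : xs.Pairwise (· ≤ ·)) (n : Nat) :
    ∀ lo hi : Int, (hi - lo).toNat ≤ n → 0 ≤ lo →
      lo ≤ (xs.countP (fun t => t ≤ l) : Int) →
      (xs.countP (fun t => t ≤ l) : Int) ≤ hi → hi ≤ (xs.length : Int) →
      bisectLoop xs l lo hi = (xs.countP (fun t => t ≤ l) : Int) := by
  induction n with
  | zero =>
    intro lo hi hn h1 h2 h3 h4
    rw [bisectLoop, dif_neg (by omega)]
    omega
  | succ n ih =>
    intro lo hi hn h1 h2 h3 h4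
    rw [bisectLoop]
    by_cases hlh : lo < hi
    · rw [dif_pos hlh]
      have hmb := PySem.Int.floordiv_two_mid_bounds (le_of_lt hlh)
      have hm2 : PySem.Int.floordiv (lo + hi) 2 < hi :=
        (PySem.Int.floordiv_lt_iff_lt_mul (by omega)).mpr (by omega)
      have hidx : PySem.List.pyGetD xs (PySem.Int.floordiv (lo + hi) 2) 0
          = xs[(PySem.Int.floordiv (lo + hi) 2).toNat]'(by omega) :=
        PySem.List.pyGetD_eq_getElem xs 0 (by omega) (by omega)
      by_cases hc : xs[(PySem.Int.floordiv (lo + hi) 2).toNat]'(by omega) ≤ l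
      · rw [hidx, if_pos hc]
        have := countP_ge_of_sorted xs l (PySem.Int.floordiv (lo + hi) 2).toNat hp (by omega) hc
        exact ih _ _ (by omega) (by omega) (by omega) h3 h4
      · rw [hidx, if_neg hc]
        have := countP_le_of_sorted xs l (PySem.Int.floordiv (lo + hi) 2).toNat hp (by omega)
          (by omega)
        exact ih _ _ (by omega) h1 h2 (by omega) (by omega)
    · rw [dif_neg hlh]
      omega

theorem bisectLoop_eq (xs : List Int) (l lo hi : Int) (hp : xs.Pairwise (· ≤ ·))
    (h1 : 0 ≤ lo) (h2 : lo ≤ (xs.countP (fun t => t ≤ l) : Int))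
    (h3 : (xs.countP (fun t => t ≤ l) : Int) ≤ hi) (h4 : hi ≤ (xs.length : Int)) :
    bisectLoop xs l lo hi = (xs.countP (fun t => t ≤ l) : Int) :=
  bisectLoop_eq_aux xs l hp (hi - lo).toNat lo hi (le_refl _) h1 h2 h3 h4

-- sum of max(0, t-l) over a sorted list, via the split at countP
theorem sum_max_eq (xs : List Int) (l : Int) (hp : xs.Pairwise (· ≤ ·)) :
    ((xs.map (fun t => max 0 (t - l))).sum : Int)
      = (xs.sum - ((xs.take (xs.countP (fun t => t ≤ l))).sum))
          - l * ((xs.length : Int) - (xs.countP (fun t => t ≤ l) : Int)) := by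
  set c := xs.countP (fun t => t ≤ l) with hc
  have hcl : c ≤ xs.length := List.countP_le_length
  -- elements of take c are ≤ l
  have htake : ∀ t ∈ xs.take c, t ≤ l := by
    intro t ht
    rcases List.mem_iff_getElem.mp ht with ⟨i, hi, rfl⟩
    rw [List.getElem_take]
    by_contra hgt
    have := countP_le_of_sorted xs l i hp (by simp at hi; omega) (by omega)
    simp at hi; omega
  -- elements of drop c are > l
  have hdrop : ∀ t ∈ xs.drop c, l < t := by
    intro t ht
    rcases List.mem_iff_getElem.mp ht with ⟨i, hi, rfl⟩
    rw [List.getElem_drop]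
    by_contra hle
    have := countP_ge_of_sorted xs l (c + i) hp (by simp at hi; omega) (by omega)
    simp at hi; omega
  -- split the sum
  conv_lhs => rw [← List.take_append_drop c xs]
  rw [List.map_append, List.sum_append]
  have hz : ((xs.take c).map (fun t => max 0 (t - l))).sum = 0 := by
    apply List.sum_eq_zero
    intro x hx
    rcases List.mem_map.mp hx with ⟨t, ht, rfl⟩
    have := htake t ht
    omega
  have hd : ((xs.drop c).map (fun t => max 0 (t - l))).sum
      = (xs.drop c).sum - l * ((xs.drop c).length : Int) := by
    rw [List.map_congr_left (fun t ht => by have := hdrop t ht; show max 0 (t - l) = t + (-l); omega :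
      ∀ t ∈ xs.drop c, (fun t => max 0 (t - l)) t = t + (-l))]
    rw [PySem.List.sum_map_add_int, List.map_id', PySem.List.sum_map_const_int]
    ring
  rw [hz, hd]
  have hsum : (xs.take c).sum + (xs.drop c).sum = xs.sum := by
    conv_rhs => rw [← List.take_append_drop c xs]
    rw [List.sum_append]
  have hlen : (xs.drop c).length = xs.length - c := List.length_drop
  rw [hlen]
  push_cast [hcl]
  linarith [hsum]

-- each probe of B's table equals A's rescan
theorem harvested_eq (trees : List Int) (l : Int) :
    harvested (PySem.List.sorted trees (fun x => x))
      (prefixSums (PySem.List.sorted trees (fun x => x)))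
      ((PySem.List.sorted trees (fun x => x)).length : Int)
      (PySem.List.pyGetD (prefixSums (PySem.List.sorted trees (fun x => x)))
        ((PySem.List.sorted trees (fun x => x)).length : Int) 0) l
      = treeCut trees l := by
  set srt := PySem.List.sorted trees (fun x => x) with hsrt
  have hp : srt.Pairwise (· ≤ ·) := by
    simpa using PySem.List.sorted_pairwise trees (fun x => x)
  set c := srt.countP (fun t => t ≤ l) with hc
  have hcl : c ≤ srt.length := List.countP_le_length
  have hperm : (PySem.List.sorted trees (fun x => x)).Perm trees :=
    PySem.List.sorted_perm trees (fun x => x) false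
  have hA : treeCut trees l = ((srt.map (fun t => max 0 (t - l))).sum : Int) := by
    rw [treeCut, PySem.List.foldl_add, zero_add]
    exact List.Perm.sum_eq ((hperm.map (fun t => max 0 (t - l))).symm)
  have hbis : bisectLoop srt l 0 (srt.length : Int) = (c : Int) :=
    bisectLoop_eq srt l 0 (srt.length : Int) hp (by omega)
      (by exact_mod_cast Nat.zero_le c) (by exact_mod_cast hcl) (le_refl _)
  have hpfx : ∀ k : Nat, k ≤ srt.length →
      PySem.List.pyGetD (prefixSums srt) (k : Int) 0 = (srt.take k).sum := by
    intro k hk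
    rw [PySem.List.pyGetD_natCast, prefixSums_eq]
    exact PySem.List.getD_map_range _ _ _ _ (by omega)
  rw [harvested, hbis, hpfx c hcl, hpfx srt.length (le_refl _), List.take_length, hA,
    sum_max_eq srt l hp, ← hc]

theorem loops_eq_aux (M : Int) (trees : List Int) (n : Nat) :
    ∀ s e : Int, (e + 1 - s).toNat ≤ n →
      solutionLoop M trees s e
        = solutionAltLoop M (PySem.List.sorted trees (fun x => x))
            (prefixSums (PySem.List.sorted trees (fun x => x)))
            ((PySem.List.sorted trees (fun x => x)).length : Int)
            (PySem.List.pyGetD (prefixSums (PySem.List.sorted trees (fun x => x)))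
              ((PySem.List.sorted trees (fun x => x)).length : Int) 0) s e := by
  induction n with
  | zero =>
    intro s e hn
    rw [solutionLoop, solutionAltLoop, dif_neg (by omega), dif_neg (by omega)]
  | succ n ih =>
    intro s e hn
    rw [solutionLoop, solutionAltLoop]
    by_cases hse : s ≤ e
    · rw [dif_pos hse, dif_pos hse]
      have hmb := PySem.Int.floordiv_two_mid_bounds hse
      rw [harvested_eq trees]
      by_cases hcond : treeCut trees (PySem.Int.floordiv (s + e) 2) ≥ M
      · rw [if_pos hcond, if_pos hcond]
        exact ih _ _ (by omega)
      · rw [if_neg hcond, if_neg hcond]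
        exact ih _ _ (by omega)
    · rw [dif_neg hse, dif_neg hse]

theorem loops_eq (M : Int) (trees : List Int) (s e : Int) :
    solutionLoop M trees s e
      = solutionAltLoop M (PySem.List.sorted trees (fun x => x))
          (prefixSums (PySem.List.sorted trees (fun x => x)))
          ((PySem.List.sorted trees (fun x => x)).length : Int)
          (PySem.List.pyGetD (prefixSums (PySem.List.sorted trees (fun x => x)))
            ((PySem.List.sorted trees (fun x => x)).length : Int) 0) s e :=
  loops_eq_aux M trees (e + 1 - s).toNat s e (le_refl _)

-- ===== VERDICT (by name: the statement is the Claim_ definition above) =====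
theorem solution_spec : Claim_equal_solution := by
  intro N M trees _
  unfold Spec_solution solution solution_alt
  exact loops_eq M trees 0 1000000000
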